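-- pv_equiv track=rewrite | github.com/guanwei49/DABL | conversion/bpmnjsonanalyzer.py | _get_preset
-- ===== SOURCE A (Python) =====
-- def _get_preset(labels, follows, shape):
--     # Note: The direct preset of a shape typically only contains the arc, not another element.
--     # Exceptions are attached events. Both is handled properly.
--     preset = set()
--     for s1 in follows.keys():
--         if s1 != shape and shape in follows[s1]:
--             if not labels[s1].startswith("MessageFlow"):
--                 if not labels[s1].startswith("SequenceFlow"):
--                     preset.add(s1)
--                 else:
--                     for s2 in follows.keys():
--                         if s2 != s1 and s1 in follows[s2]:
--                             preset.add(s2)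
--     return preset
-- ===== SOURCE B (Python) =====
-- def _get_preset(labels, follows, shape):
--     # One pass builds the reverse adjacency map; presets are then direct lookups.
--     rev = {}
--     for src, targets in follows.items():
--         for t in dict.fromkeys(targets):
--             rev.setdefault(t, []).append(src)
--     preset = set()
--     for s1 in rev.get(shape, []):
--         if s1 != shape:
--             lab = labels[s1]
--             if not lab.startswith("MessageFlow"):
--                 if lab.startswith("SequenceFlow"):
--                     for s2 in rev.get(s1, []):
--                         if s2 != s1:
--                             preset.add(s2)
--                 else:
--                     preset.add(s1)
--     return preset
-- ===== Notes on version B (the rewrite author's own statement) =====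
-- stated objective: alternative
-- what changed: A re-scans all of follows for every key (and again, nested, for every SequenceFlow predecessor); B instead builds a reverse-adjacency map in one pass over the edges and answers with direct lookups in it, trading A's repeated membership scans for one index-building pass.
import Mathlib
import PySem

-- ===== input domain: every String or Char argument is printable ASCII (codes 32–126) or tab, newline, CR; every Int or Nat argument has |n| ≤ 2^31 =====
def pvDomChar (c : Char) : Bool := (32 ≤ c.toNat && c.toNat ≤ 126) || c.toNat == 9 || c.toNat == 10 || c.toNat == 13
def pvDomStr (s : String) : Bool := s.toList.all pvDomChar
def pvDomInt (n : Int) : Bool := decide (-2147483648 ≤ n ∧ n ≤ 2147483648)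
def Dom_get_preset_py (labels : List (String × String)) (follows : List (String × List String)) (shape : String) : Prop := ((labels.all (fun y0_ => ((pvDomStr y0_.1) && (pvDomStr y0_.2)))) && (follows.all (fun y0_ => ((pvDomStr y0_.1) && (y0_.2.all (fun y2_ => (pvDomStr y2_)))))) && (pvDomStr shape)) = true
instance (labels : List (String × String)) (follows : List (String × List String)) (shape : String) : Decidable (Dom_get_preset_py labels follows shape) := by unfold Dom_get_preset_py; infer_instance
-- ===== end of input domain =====

-- B replaces A's nested rescans of follows by a reverse-adjacency map built in one pass,
-- so presets come from direct lookups in that map (objective: alternative).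

-- ===== PORT A =====
def get_preset_py (labels : List (String × String)) (follows : List (String × List String)) (shape : String) : List String :=
  -- preset = set(); for s1 in follows.keys(): ...
  (PySem.Dict.mk follows).keys.foldl (fun preset s1 =>
    if s1 ≠ shape ∧ shape ∈ (PySem.Dict.mk follows).getD s1 [] then
      if ¬ PySem.Str.startswith ((PySem.Dict.mk labels).getD s1 "") "MessageFlow" then
        if ¬ PySem.Str.startswith ((PySem.Dict.mk labels).getD s1 "") "SequenceFlow" then
          PySem.Set.add preset s1
        else
          -- for s2 in follows.keys(): ...
          (PySem.Dict.mk follows).keys.foldl (fun preset s2 =>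
            if s2 ≠ s1 ∧ s1 ∈ (PySem.Dict.mk follows).getD s2 [] then
              PySem.Set.add preset s2
            else preset) preset
      else preset
    else preset) []

-- ===== PORT B =====
-- rev = {}; for src, targets in follows.items(): for t in dict.fromkeys(targets): rev[t] = rev.get(t, []) + [src]
def revMap (follows : List (String × List String)) : PySem.Dict String (List String) :=
  follows.foldl (fun d p =>
    (PySem.List.dedup p.2).foldl (fun d t => d.modify t [] (fun l => l ++ [p.1])) d) PySem.Dict.empty

def get_preset_py_alt (labels : List (String × String)) (follows : List (String × List String)) (shape : String) : List String :=
  let rev := revMap follows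
  -- preset = set(); for s1 in rev.get(shape, []): ...
  (rev.getD shape []).foldl (fun preset s1 =>
    if s1 ≠ shape then
      let lab := (PySem.Dict.mk labels).getD s1 ""
      if ¬ PySem.Str.startswith lab "MessageFlow" then
        if PySem.Str.startswith lab "SequenceFlow" then
          (rev.getD s1 []).foldl (fun preset s2 =>
            if s2 ≠ s1 then PySem.Set.add preset s2 else preset) preset
        else PySem.Set.add preset s1
      else preset
    else preset) []

-- ===== PRECONDITION & SPEC =====
-- Pre_ excludes (a) association lists whose keys repeat — those do not represent a Python dict
-- (Python merges duplicate keys, the assoc-list ports look up the first match), and (b) inputs where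
-- some non-shape predecessor of shape has no entry in labels — there Python A raises KeyError.
def Pre_get_preset_py (labels : List (String × String)) (follows : List (String × List String)) (shape : String) : Prop :=
  -- e.g. follows = [("SequenceFlow_9", ["Task_3"])], shape = "Task_3", with "SequenceFlow_9" absent from labels is excluded: A raises KeyError there
  (follows.map Prod.fst).Nodup ∧ (labels.map Prod.fst).Nodup ∧
  ∀ p ∈ follows, p.1 ≠ shape → shape ∈ p.2 → p.1 ∈ labels.map Prod.fst
instance (labels : List (String × String)) (follows : List (String × List String)) (shape : String) : Decidable (Pre_get_preset_py labels follows shape) := by unfold Pre_get_preset_py; infer_instance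

def pvWitness_get_preset_py : (List (String × String)) × (List (String × List String)) × String :=
  ([("a", "Task_A"), ("f", "SequenceFlow_1"), ("g", "MessageFlow_2"), ("x", "Gateway"), ("y", "Task_B")],
   [("a", ["f"]), ("f", ["b"]), ("g", ["b", "x"]), ("x", ["b"]), ("y", ["b", "a"]), ("b", ["y"])], "b")

def Spec_get_preset_py (labels : List (String × String)) (follows : List (String × List String)) (shape : String) (out : List String) : Prop := out = get_preset_py_alt labels follows shape
instance (labels : List (String × String)) (follows : List (String × List String)) (shape : String) (out : List String) : Decidable (Spec_get_preset_py labels follows shape out) := by unfold Spec_get_preset_py; infer_instance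

-- ===== CLAIM (what is proved, stated in full; the proofs are below) =====
def Claim_equal_get_preset_py : Prop := ∀ (labels : List (String × String)) (follows : List (String × List String)) (shape : String), Dom_get_preset_py labels follows shape → Pre_get_preset_py labels follows shape → Spec_get_preset_py labels follows shape (get_preset_py labels follows shape)

-- ===== LEMMAS AND PROOFS =====

-- Common normal form both ports are reduced to.
def nfInner (follows : List (String × List String)) (s1 : String) (preset : List String) : List String :=
  (follows.filter (fun q => decide (q.1 ≠ s1) && decide (s1 ∈ q.2))).foldl
    (fun pr q => PySem.Set.add pr q.1) preset

def nf (labels : List (String × String)) (follows : List (String × List String)) (shape : String) : List String :=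
  (follows.filter (fun p => decide (p.1 ≠ shape) && decide (shape ∈ p.2))).foldl (fun preset p =>
    if ¬ PySem.Str.startswith ((PySem.Dict.mk labels).getD p.1 "") "MessageFlow" then
      if ¬ PySem.Str.startswith ((PySem.Dict.mk labels).getD p.1 "") "SequenceFlow" then
        PySem.Set.add preset p.1
      else nfInner follows p.1 preset
    else preset) []

theorem filter_beq_of_nodup {l : List String} (h : l.Nodup) (s : String) :
    l.filter (· == s) = if s ∈ l then [s] else [] := by
  induction l with
  | nil => simp
  | cons a t ih =>
    simp only [List.nodup_cons] at h
    by_cases ha : a = s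
    · subst ha
      simp [h.1, ih h.2]
    · simp [ha, ih h.2, Ne.symm ha]

theorem revMap_eq_flat (follows : List (String × List String)) :
    revMap follows =
      (follows.flatMap (fun p => (PySem.List.dedup p.2).map (fun t => (t, p.1)))).foldl
        (fun d q => d.modify q.1 [] (fun l => l ++ [q.2])) PySem.Dict.empty := by
  rw [List.foldl_flatMap]
  unfold revMap
  apply PySem.List.foldl_congr_mem
  intro acc p _
  rw [List.foldl_map]

theorem revMap_getD (follows : List (String × List String)) (s : String) :
    (revMap follows).getD s [] = (follows.filter (fun p => decide (s ∈ p.2))).map Prod.fst := by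
  rw [revMap_eq_flat, PySem.Dict.getD_foldl_modify_append]
  simp only [PySem.Dict.getD_empty, List.nil_append]
  induction follows with
  | nil => simp
  | cons p fs ih =>
    simp only [List.flatMap_cons, List.filter_append, List.map_append, ih, List.filter_cons]
    rw [List.filter_map]
    have hc : ((fun q => q.1 == s) ∘ (fun t => (t, p.1))) = (· == s) := rfl
    rw [hc, filter_beq_of_nodup (PySem.List.nodup_dedup p.2) s]
    by_cases hs : s ∈ p.2
    · simp [hs]
    · simp [hs]

theorem innerA_eq (follows : List (String × List String)) (s1 : String)
    (hnf : (follows.map Prod.fst).Nodup) (preset : List String) :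
    (follows.map (fun x => x.1)).foldl (fun preset s2 =>
        if s2 ≠ s1 ∧ s1 ∈ (PySem.Dict.mk follows).getD s2 [] then
          PySem.Set.add preset s2
        else preset) preset = nfInner follows s1 preset := by
  have hkeys : (PySem.Dict.mk follows).keys.Nodup := by rw [PySem.Dict.keys_mk]; exact hnf
  rw [List.foldl_map]
  rw [PySem.List.foldl_congr_mem _ _
      (fun pr q => if q.1 ≠ s1 ∧ s1 ∈ q.2 then PySem.Set.add pr q.1 else pr) _ ?_]
  · rw [PySem.List.foldl_ite_eq_foldl_filter (fun q : String × List String => q.1 ≠ s1 ∧ s1 ∈ q.2)]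
    unfold nfInner
    rw [List.filter_congr]
    intro q _
    simp
  · intro acc q hq
    rw [PySem.Dict.getD_of_mem_items (PySem.Dict.mk follows) (k := q.1) (v := q.2) hq hkeys]

theorem innerB_eq (follows : List (String × List String)) (s1 : String) (preset : List String) :
    ((revMap follows).getD s1 []).foldl (fun preset s2 =>
        if s2 ≠ s1 then PySem.Set.add preset s2 else preset) preset = nfInner follows s1 preset := by
  rw [revMap_getD,
    PySem.List.foldl_ite_eq_foldl_filter (fun s2 : String => s2 ≠ s1) PySem.Set.add,
    List.filter_map, List.foldl_map, List.filter_filter]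
  rfl

theorem A_eq_nf (labels : List (String × String)) (follows : List (String × List String)) (shape : String)
    (hnf : (follows.map Prod.fst).Nodup) :
    get_preset_py labels follows shape = nf labels follows shape := by
  have hkeys : (PySem.Dict.mk follows).keys.Nodup := by rw [PySem.Dict.keys_mk]; exact hnf
  unfold get_preset_py
  rw [PySem.Dict.keys_mk, List.foldl_map]
  rw [PySem.List.foldl_congr_mem _ _
      (fun preset (p : String × List String) =>
        if p.1 ≠ shape ∧ shape ∈ p.2 then
          if ¬ PySem.Str.startswith ((PySem.Dict.mk labels).getD p.1 "") "MessageFlow" then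
            if ¬ PySem.Str.startswith ((PySem.Dict.mk labels).getD p.1 "") "SequenceFlow" then
              PySem.Set.add preset p.1
            else nfInner follows p.1 preset
          else preset
        else preset) _ ?_]
  · rw [PySem.List.foldl_ite_eq_foldl_filter (fun p : String × List String => p.1 ≠ shape ∧ shape ∈ p.2)]
    unfold nf
    rw [List.filter_congr]
    intro q _
    simp
  · intro acc p hp
    rw [PySem.Dict.getD_of_mem_items (PySem.Dict.mk follows) (k := p.1) (v := p.2) hp hkeys,
      innerA_eq follows p.1 hnf]

theorem B_eq_nf (labels : List (String × String)) (follows : List (String × List String)) (shape : String) :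
    get_preset_py_alt labels follows shape = nf labels follows shape := by
  unfold get_preset_py_alt
  simp only []
  rw [revMap_getD,
    PySem.List.foldl_ite_eq_foldl_filter (fun s1 : String => s1 ≠ shape),
    List.filter_map, List.foldl_map, List.filter_filter]
  unfold nf
  apply PySem.List.foldl_congr_mem
  intro acc q hq
  rw [innerB_eq follows q.1]
  split_ifs <;> simp_all

-- ===== VERDICT (by name: the statement is the Claim_ definition above) =====
theorem get_preset_py_spec : Claim_equal_get_preset_py := by
  intro labels follows shape _ hpre
  unfold Spec_get_preset_py
  rw [A_eq_nf labels follows shape hpre.1, B_eq_nf]
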